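-- pv_equiv track=rewrite | github.com/Stonewater-Digital/snowdrop-mcp | skills/integrations/github_issue_tracker.py | _difficulty_from_labels
-- ===== SOURCE A (Python) =====
-- def _difficulty_from_labels(labels: list[str]) -> str:
--     if any(label in {"easy", "good first issue"} for label in labels):
--         return "low"
--     if any(label in {"medium", "intermediate"} for label in labels):
--         return "medium"
--     if any(label in {"hard", "complex"} for label in labels):
--         return "high"
--     return "unknown"
-- ===== SOURCE B (Python) =====
-- _TIER = {
--     "easy": 0, "good first issue": 0,
--     "medium": 1, "intermediate": 1,
--     "hard": 2, "complex": 2,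
-- }
-- _LEVEL = ("low", "medium", "high", "unknown")
--
--
-- def _difficulty_from_labels(labels: list[str]) -> str:
--     best = 3
--     for label in labels:
--         p = _TIER.get(label, 3)
--         if p < best:
--             best = p
--     return _LEVEL[best]
-- ===== Notes on version B (the rewrite author's own statement) =====
-- stated objective: simpler
-- what changed: Replaces three sequential any() scans over the label list by a single pass that keeps the minimum tier priority from a prebuilt label->priority dict and indexes a level table with it.
import Mathlib
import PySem

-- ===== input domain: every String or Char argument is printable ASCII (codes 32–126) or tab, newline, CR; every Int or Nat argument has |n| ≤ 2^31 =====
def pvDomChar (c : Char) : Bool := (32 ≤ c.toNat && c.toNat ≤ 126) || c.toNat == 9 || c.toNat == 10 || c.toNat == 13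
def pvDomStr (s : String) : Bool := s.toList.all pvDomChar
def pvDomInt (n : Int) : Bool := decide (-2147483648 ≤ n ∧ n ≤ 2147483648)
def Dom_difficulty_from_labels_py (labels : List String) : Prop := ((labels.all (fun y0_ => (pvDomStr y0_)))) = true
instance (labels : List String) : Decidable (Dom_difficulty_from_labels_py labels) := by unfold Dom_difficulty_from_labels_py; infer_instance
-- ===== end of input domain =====

-- B replaces A's three sequential any() scans by one pass keeping the minimum tier priority from a label->priority table (simpler, single traversal).


-- ===== PORT A =====
def difficulty_from_labels_py (labels : List String) : String :=
  if labels.any (fun label => label == "easy" || label == "good first issue") then "low"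
  else if labels.any (fun label => label == "medium" || label == "intermediate") then "medium"
  else if labels.any (fun label => label == "hard" || label == "complex") then "high"
  else "unknown"

-- ===== PORT B =====
-- _TIER.get(label, 3)
def pvTierOf (l : String) : Nat :=
  if l == "easy" || l == "good first issue" then 0
  else if l == "medium" || l == "intermediate" then 1
  else if l == "hard" || l == "complex" then 2
  else 3

-- _LEVEL[best]
def pvLevel (n : Nat) : String :=
  match n with
  | 0 => "low"
  | 1 => "medium"
  | 2 => "high"
  | _ => "unknown"

def difficulty_from_labels_py_alt (labels : List String) : String :=
  pvLevel (labels.foldl (fun best label =>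
    let p := pvTierOf label
    if p < best then p else best) 3)

-- ===== PRECONDITION & SPEC =====
def Spec_difficulty_from_labels_py (labels : List String) (out : String) : Prop := out = difficulty_from_labels_py_alt labels
instance (labels : List String) (out : String) : Decidable (Spec_difficulty_from_labels_py labels out) := by unfold Spec_difficulty_from_labels_py; infer_instance

-- ===== CLAIM (what is proved, stated in full; the proofs are below) =====
def Claim_equal_difficulty_from_labels_py : Prop := ∀ (labels : List String), Dom_difficulty_from_labels_py labels → Spec_difficulty_from_labels_py labels (difficulty_from_labels_py labels)

-- ===== LEMMAS AND PROOFS =====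

-- minimum tier of a list, expressed the way A computes its answer
def pvMinChain (xs : List String) : Nat :=
  if xs.any (fun label => label == "easy" || label == "good first issue") then 0
  else if xs.any (fun label => label == "medium" || label == "intermediate") then 1
  else if xs.any (fun label => label == "hard" || label == "complex") then 2
  else 3

theorem pvMinChain_le (xs : List String) : pvMinChain xs ≤ 3 := by
  unfold pvMinChain; split_ifs <;> omega

theorem pvMinChain_cons (x : String) (xs : List String) :
    pvMinChain (x :: xs) = min (pvTierOf x) (pvMinChain xs) := by
  unfold pvMinChain pvTierOf
  by_cases h0 : (x == "easy" || x == "good first issue") = true <;>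
  by_cases h1 : (x == "medium" || x == "intermediate") = true <;>
  by_cases h2 : (x == "hard" || x == "complex") = true <;>
  simp [List.any_cons, h0, h1, h2] <;> split_ifs <;> omega

theorem pvFoldl_min (xs : List String) (b : Nat) (hb : b ≤ 3) :
    xs.foldl (fun best label =>
      let p := pvTierOf label
      if p < best then p else best) b = min b (pvMinChain xs) := by
  induction xs generalizing b with
  | nil => unfold pvMinChain; simp; omega
  | cons x xs ih =>
      have hx : pvTierOf x ≤ 3 := by unfold pvTierOf; split_ifs <;> omega
      rw [List.foldl_cons]
      rw [ih _ (by simp only; split_ifs <;> omega)]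
      rw [pvMinChain_cons]
      simp only
      split_ifs <;> omega

-- ===== VERDICT (by name: the statement is the Claim_ definition above) =====
theorem difficulty_from_labels_py_spec : Claim_equal_difficulty_from_labels_py := by
  intro labels _
  unfold Spec_difficulty_from_labels_py difficulty_from_labels_py difficulty_from_labels_py_alt
  rw [pvFoldl_min _ 3 (le_refl 3)]
  have h := pvMinChain_le labels
  have hmin : min 3 (pvMinChain labels) = pvMinChain labels := by omega
  rw [hmin]
  unfold pvMinChain
  split_ifs <;> rfl
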